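-- pv_equiv track=rewrite | github.com/cirosantilli/project-euler-solvers | solvers/258.py | _mul_poly_mod_py
-- ===== SOURCE A (Python) =====
-- from typing import List
--
-- MOD = 20092010
--
-- D = 2000  # order
--
-- def _mul_poly_mod_py(a: List[int], b: List[int]) -> List[int]:
--     """Pure-Python multiply; correct but slow."""
--     # Full convolution (0..2D-2)
--     c = [0] * (2 * D - 1)
--     for i, ai in enumerate(a):
--         if ai:
--             for j, bj in enumerate(b):
--                 if bj:
--                     c[i + j] += ai * bj
--     # Fold once (max degree 3998 so one pass suffices)
--     for i in range(2 * D - 2, D - 1, -1):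
--         t = c[i] % MOD
--         if t:
--             c[i - D] = (c[i - D] + t) % MOD
--             c[i - D + 1] = (c[i - D + 1] + t) % MOD
--     return [x % MOD for x in c[:D]]
-- ===== SOURCE B (Python) =====
-- MOD = 20092010
--
-- D = 2000  # order
--
-- def _conv(a, b, k):
--     """Coefficient k of a*b, computed output-index-first (no scratch array)."""
--     lo = max(0, k - len(b) + 1)
--     hi = min(k + 1, len(a))
--     s = 0
--     for i in range(lo, hi):
--         s += a[i] * b[k - i]
--     return s
--
-- def _mul_poly_mod_py(a, b):
--     out = []
--     for k in range(D):
--         s = _conv(a, b, k)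
--         s += _conv(a, b, k + D) % MOD
--         if k >= 1:
--             s += _conv(a, b, k + D - 1) % MOD
--         out.append(s % MOD)
--     return out
-- ===== Notes on version B (the rewrite author's own statement) =====
-- stated objective: alternative
-- what changed: A fills a 3999-entry scratch array via input-indexed nested loops and then folds the high half down in place; B computes each of the 2000 output coefficients directly as an output-indexed convolution sum plus the two folded high coefficients, with no intermediate array or mutation.
import Mathlib
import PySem

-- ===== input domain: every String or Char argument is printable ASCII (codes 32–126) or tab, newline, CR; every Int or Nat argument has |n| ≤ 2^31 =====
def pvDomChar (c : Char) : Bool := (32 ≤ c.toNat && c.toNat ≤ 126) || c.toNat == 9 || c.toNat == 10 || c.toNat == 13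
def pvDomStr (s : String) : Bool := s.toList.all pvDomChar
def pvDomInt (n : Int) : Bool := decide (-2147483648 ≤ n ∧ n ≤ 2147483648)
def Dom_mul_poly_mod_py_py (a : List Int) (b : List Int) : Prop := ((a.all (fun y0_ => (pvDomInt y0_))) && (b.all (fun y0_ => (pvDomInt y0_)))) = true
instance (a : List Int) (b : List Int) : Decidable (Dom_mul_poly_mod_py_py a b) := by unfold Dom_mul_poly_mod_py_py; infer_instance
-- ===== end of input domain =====

-- B replaces A's scratch-array convolution + in-place downward fold by a direct
-- per-output-coefficient summation (output-indexed convolution, no mutation);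
-- an alternative structure of the same asymptotic cost.

-- ===== PORT A =====
-- inner loop 'for j, bj in enumerate(b): if bj: c[i+j] += ai * bj'; pos = i + j.
-- The write c[i+j] is in range under Pre_ (Python raises IndexError otherwise; Pre_ excludes that).
def pvInnerA (ai : Int) : List Int → Nat → List Int → List Int
  | [], _, c => c
  | bj :: rest, pos, c =>
      pvInnerA ai rest (pos + 1)
        (if bj ≠ 0 then c.set pos (c.getD pos 0 + ai * bj) else c)

-- outer loop 'for i, ai in enumerate(a): if ai: <inner loop>'
def pvOuterA : List Int → Nat → List Int → List Int → List Int
  | [], _, _, c => c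
  | ai :: rest, i, b, c =>
      pvOuterA rest (i + 1) b (if ai ≠ 0 then pvInnerA ai b i c else c)

-- one iteration of the fold loop body, at index i (t = c[i] % MOD, two conditional writes)
def pvStepA (i : Nat) (c : List Int) : List Int :=
  let t := PySem.Int.mod (c.getD i 0) 20092010
  if t ≠ 0 then
    let c1 := c.set (i - 2000) (PySem.Int.mod (c.getD (i - 2000) 0 + t) 20092010)
    c1.set (i - 2000 + 1) (PySem.Int.mod (c1.getD (i - 2000 + 1) 0 + t) 20092010)
  else c

-- 'for i in range(2*D - 2, D - 1, -1)': i = 3998, 3997, …, 2000; n iterations left ⇒ i = 1999 + n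
def pvFoldA : Nat → List Int → List Int
  | 0, c => c
  | n + 1, c => pvFoldA n (pvStepA (2000 + n) c)

-- 'c = [0] * (2*D - 1)', the two loop nests, then 'return [x % MOD for x in c[:D]]'
def mul_poly_mod_py_py (a : List Int) (b : List Int) : List Int :=
  ((pvFoldA 1999 (pvOuterA a 0 b (List.replicate 3999 0))).take 2000).map
    (fun x => PySem.Int.mod x 20092010)

-- ===== PORT B =====
-- _conv(a, b, k): Nat subtraction in 'k + 1 - b.length' IS Python's max(0, k - len(b) + 1)
def pvConvB (a : List Int) (b : List Int) (k : Nat) : Int :=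
  let lo := k + 1 - b.length
  let hi := min (k + 1) a.length
  (List.range' lo (hi - lo)).foldl (fun s i => s + a.getD i 0 * b.getD (k - i) 0) 0

-- the 'for k in range(D)' loop with 'out.append(s % MOD)'
def mul_poly_mod_py_py_alt (a : List Int) (b : List Int) : List Int :=
  (List.range 2000).foldl (fun out k =>
    let s := pvConvB a b k
    let s := s + PySem.Int.mod (pvConvB a b (k + 2000)) 20092010
    let s := if 1 ≤ k then s + PySem.Int.mod (pvConvB a b (k + 1999)) 20092010 else s
    out ++ [PySem.Int.mod s 20092010]) []

-- ===== PRECONDITION & SPEC =====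
-- Pre_ excludes exactly the inputs on which A raises IndexError: a pair of nonzero
-- coefficients whose indices sum past 3998 makes 'c[i + j] += ai * bj' index out of range.
def Pre_mul_poly_mod_py_py (a : List Int) (b : List Int) : Prop :=
  ∀ i < a.length, ∀ j < b.length, a.getD i 0 ≠ 0 → b.getD j 0 ≠ 0 → i + j ≤ 3998

instance (a : List Int) (b : List Int) : Decidable (Pre_mul_poly_mod_py_py a b) := by
  unfold Pre_mul_poly_mod_py_py; infer_instance

instance (a : List Int) (b : List Int) : Decidable (Pre_mul_poly_mod_py_py a b) := by
  unfold Pre_mul_poly_mod_py_py; infer_instance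

def pvWitness_mul_poly_mod_py_py : List Int × List Int := ([1, 2], [3, 4])

def Spec_mul_poly_mod_py_py (a : List Int) (b : List Int) (out : List Int) : Prop :=
  out = mul_poly_mod_py_py_alt a b
instance (a : List Int) (b : List Int) (out : List Int) : Decidable (Spec_mul_poly_mod_py_py a b out) := by
  unfold Spec_mul_poly_mod_py_py; infer_instance

-- ===== CLAIM (what is proved, stated in full; the proofs are below) =====
def Claim_equal_mul_poly_mod_py_py : Prop := ∀ (a : List Int) (b : List Int), Dom_mul_poly_mod_py_py a b → Pre_mul_poly_mod_py_py a b → Spec_mul_poly_mod_py_py a b (mul_poly_mod_py_py a b)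

-- ===== LEMMAS AND PROOFS =====

-- canonical coefficient k of the product polynomial a*b
def pvConv (a : List Int) (b : List Int) (k : Nat) : Int :=
  ∑ i ∈ Finset.range a.length,
    if i ≤ k ∧ k - i < b.length then a.getD i 0 * b.getD (k - i) 0 else 0

theorem pv_getD_set (xs : List Int) (n k : Nat) (v : Int) :
    (xs.set n v).getD k 0 = if n = k ∧ n < xs.length then v else xs.getD k 0 := by
  simp only [List.getD_eq_getElem?_getD, List.getElem?_set]
  by_cases h1 : n = k
  · subst h1
    by_cases h2 : n < xs.length <;> simp [h2]
  · simp [h1]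

theorem pvInnerA_length (ai : Int) (b' : List Int) (pos : Nat) (c : List Int) :
    (pvInnerA ai b' pos c).length = c.length := by
  induction b' generalizing pos c with
  | nil => rfl
  | cons bj rest ih =>
      simp only [pvInnerA]
      rw [ih]
      split <;> simp

theorem pvInnerA_getD (ai : Int) (b' : List Int) (pos : Nat) (c : List Int) (k : Nat) :
    (pvInnerA ai b' pos c).getD k 0 =
      c.getD k 0 + (if pos ≤ k ∧ k - pos < b'.length ∧ k < c.length
        then ai * b'.getD (k - pos) 0 else 0) := by
  induction b' generalizing pos c with
  | nil => simp [pvInnerA]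
  | cons bj rest ih =>
      simp only [pvInnerA]
      by_cases hbj : bj = 0
      · rw [if_neg (by simp [hbj]), ih]
        congr 1
        by_cases hpk : pos = k
        · subst hpk
          rw [if_neg (by omega)]
          by_cases hc : pos ≤ pos ∧ pos - pos < (bj :: rest).length ∧ pos < c.length
          · rw [if_pos hc]; simp [hbj]
          · rw [if_neg hc]
        · by_cases hc : pos + 1 ≤ k ∧ k - (pos + 1) < rest.length ∧ k < c.length
          · rw [if_pos hc, if_pos (by simp only [List.length_cons]; omega)]
            have h2 : k - pos = (k - (pos + 1)) + 1 := by omega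
            simp [h2]
          · rw [if_neg hc, if_neg (by simp only [List.length_cons]; omega)]
      · rw [if_pos hbj, ih, List.length_set, pv_getD_set]
        simp only [List.length_cons]
        split_ifs with h1 h2 h3 <;>
          first
          | (exfalso; omega)
          | rfl
          | (obtain ⟨he, hl⟩ := h1; subst he
             simp only [Nat.sub_self, List.getD_cons_zero]
             ring)
          | (have h4 : k - pos = (k - (pos + 1)) + 1 := by omega
             simp [h4])

theorem pvOuterA_length (a' : List Int) (i : Nat) (b c : List Int) :
    (pvOuterA a' i b c).length = c.length := by
  induction a' generalizing i c with
  | nil => rfl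
  | cons ai rest ih =>
      simp only [pvOuterA]
      rw [ih]
      split <;> simp [pvInnerA_length]

theorem pvOuterA_getD (a' : List Int) (i : Nat) (b c : List Int) (k : Nat) :
    (pvOuterA a' i b c).getD k 0 =
      c.getD k 0 + (if k < c.length then
        ∑ t ∈ Finset.range a'.length,
          (if i + t ≤ k ∧ k - (i + t) < b.length
            then a'.getD t 0 * b.getD (k - (i + t)) 0 else 0) else 0) := by
  induction a' generalizing i c with
  | nil => simp [pvOuterA]
  | cons ai rest ih =>
      have hsum : ∀ (x : Int), (if k < c.length then
            ∑ t ∈ Finset.range (ai :: rest).length,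
              (if i + t ≤ k ∧ k - (i + t) < b.length
                then (ai :: rest).getD t 0 * b.getD (k - (i + t)) 0 else 0) else 0)
          = (if i ≤ k ∧ k - i < b.length ∧ k < c.length then ai * b.getD (k - i) 0 else 0)
            + (if k < c.length then
              ∑ t ∈ Finset.range rest.length,
                (if i + 1 + t ≤ k ∧ k - (i + 1 + t) < b.length
                  then rest.getD t 0 * b.getD (k - (i + 1 + t)) 0 else 0) else 0) := by
        intro _
        by_cases hk : k < c.length
        · rw [if_pos hk, if_pos hk, List.length_cons, Finset.sum_range_succ' _ rest.length]
          have hre : ∀ t, (if i + (t + 1) ≤ k ∧ k - (i + (t + 1)) < b.length then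
                (ai :: rest).getD (t + 1) 0 * b.getD (k - (i + (t + 1))) 0 else 0)
              = (if i + 1 + t ≤ k ∧ k - (i + 1 + t) < b.length then
                rest.getD t 0 * b.getD (k - (i + 1 + t)) 0 else 0) := by
            intro t
            have h3 : i + (t + 1) = i + 1 + t := by omega
            simp [h3]
          rw [Finset.sum_congr rfl (fun t _ => hre t)]
          have h0 : (if i + 0 ≤ k ∧ k - (i + 0) < b.length then
                (ai :: rest).getD 0 0 * b.getD (k - (i + 0)) 0 else 0)
              = (if i ≤ k ∧ k - i < b.length ∧ k < c.length then ai * b.getD (k - i) 0 else 0) := by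
            by_cases hc : i ≤ k ∧ k - i < b.length
            · rw [if_pos (by simpa using hc), if_pos ⟨hc.1, hc.2, hk⟩]
              simp
            · rw [if_neg (by simpa using hc), if_neg (by tauto)]
          rw [h0]
          ring
        · rw [if_neg hk, if_neg hk]
          have : ¬(i ≤ k ∧ k - i < b.length ∧ k < c.length) := by tauto
          rw [if_neg this, add_zero]
      simp only [pvOuterA]
      by_cases hai : ai = 0
      · rw [if_neg (by simp [hai]), ih, hsum 0]
        have h1 : (if i ≤ k ∧ k - i < b.length ∧ k < c.length then ai * b.getD (k - i) 0 else 0) = 0 := by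
          split <;> simp [hai]
        rw [h1]
        ring
      · rw [if_pos hai, ih, pvInnerA_getD, pvInnerA_length, hsum 0]
        ring

theorem pvmod (x : Int) : PySem.Int.mod x 20092010 = x % 20092010 :=
  PySem.Int.mod_eq_emod_of_pos (by norm_num)

theorem pvStepA_length (i : Nat) (c : List Int) : (pvStepA i c).length = c.length := by
  unfold pvStepA
  dsimp only
  split <;> simp

theorem pvFoldA_length (n : Nat) (c : List Int) :
    (pvFoldA n c).length = c.length := by
  induction n generalizing c with
  | zero => rfl
  | succ n ih => rw [pvFoldA, ih, pvStepA_length]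

theorem pvStepA_getD_high (i : Nat) (hi : 2000 ≤ i) (hi2 : i ≤ 3998) (c : List Int)
    (j : Nat) (hj : 2000 ≤ j) :
    (pvStepA i c).getD j 0 = c.getD j 0 := by
  unfold pvStepA
  dsimp only
  split
  · rw [pv_getD_set, List.length_set, if_neg (by omega), pv_getD_set, if_neg (by omega)]
  · rfl

theorem pvStepA_getD_low (i : Nat) (hi : 2000 ≤ i) (hi2 : i ≤ 3998) (c : List Int)
    (hc : c.length = 3999) (k : Nat) (_hk : k ≤ 1999) :
    (pvStepA i c).getD k 0 % 20092010 =
      (c.getD k 0 + (if k + 2000 = i ∨ k + 1999 = i then (c.getD i 0) % 20092010 else 0))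
        % 20092010 := by
  unfold pvStepA
  dsimp only
  simp only [pvmod, ne_eq, ite_not]
  split
  · next h =>
    by_cases hki : k + 2000 = i ∨ k + 1999 = i
    · rw [if_pos hki, h, add_zero]
    · rw [if_neg hki, add_zero]
  · next h =>
    rw [pv_getD_set, List.length_set, pv_getD_set]
    by_cases h1 : k + 1999 = i
    · have e : i - 2000 + 1 = k := by omega
      rw [e, if_pos ⟨rfl, by omega⟩, if_neg (by omega), if_pos (Or.inr h1)]
      omega
    · rw [if_neg (by omega)]
      by_cases h2 : k + 2000 = i
      · have e : i - 2000 = k := by omega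
        rw [e, pv_getD_set, if_pos ⟨rfl, by omega⟩, if_pos (Or.inl h2)]
        omega
      · rw [pv_getD_set, if_neg (by omega), if_neg (by omega), add_zero]

theorem pvFoldA_getD_low (n : Nat) (hn : n ≤ 1999) (c : List Int) (hc : c.length = 3999)
    (k : Nat) (hk : k ≤ 1999) :
    ((pvFoldA n c).getD k 0) % 20092010 =
      (c.getD k 0
        + (if k + 2000 ≤ 1999 + n then (c.getD (k + 2000) 0) % 20092010 else 0)
        + (if 1 ≤ k ∧ k + 1999 ≤ 1999 + n then (c.getD (k + 1999) 0) % 20092010 else 0))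
        % 20092010 := by
  induction n generalizing c with
  | zero =>
      rw [if_neg (by omega), if_neg (by omega)]
      simp [pvFoldA]
  | succ n ih =>
      rw [pvFoldA]
      have hlen : (pvStepA (2000 + n) c).length = 3999 := by rw [pvStepA_length, hc]
      rw [ih (by omega) _ hlen]
      have hh2 : (pvStepA (2000 + n) c).getD (k + 2000) 0 = c.getD (k + 2000) 0 :=
        pvStepA_getD_high _ (by omega) (by omega) _ _ (by omega)
      have hlow : (pvStepA (2000 + n) c).getD k 0 % 20092010 =
          (c.getD k 0 + (if k + 2000 = 2000 + n ∨ k + 1999 = 2000 + n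
            then c.getD (2000 + n) 0 % 20092010 else 0)) % 20092010 :=
        pvStepA_getD_low _ (by omega) (by omega) _ hc _ hk
      rw [hh2]
      split_ifs at hlow ⊢ <;>
          (try rw [show (2000 + n : Nat) = k + 2000 from by omega] at hlow ⊢) <;>
          (try rw [show (2000 + n : Nat) = k + 1999 from by omega] at hlow ⊢) <;>
          (try rw [pvStepA_getD_high _ (by omega) (by omega) _ (k + 1999) (by omega)]) <;>
          omega

theorem pv_foldl_range' (f : Nat → Int) (n : Nat) : ∀ (s : Nat) (init : Int),
    (List.range' s n).foldl (fun acc i => acc + f i) init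
      = init + ∑ j ∈ Finset.range n, f (s + j) := by
  induction n with
  | zero => simp
  | succ n ih =>
      intro s init
      rw [List.range'_succ, List.foldl_cons, ih, Finset.sum_range_succ' (fun j => f (s + j)) n]
      have h : ∀ j, f (s + 1 + j) = f (s + (j + 1)) := by
        intro j; congr 1; omega
      rw [Finset.sum_congr rfl (fun j _ => h j), Nat.add_zero]
      omega

theorem pvConvB_eq_pvConv (a b : List Int) (k : Nat) :
    pvConvB a b k = pvConv a b k := by
  unfold pvConvB pvConv
  dsimp only
  rw [pv_foldl_range', zero_add,
    ← Finset.sum_Ico_eq_sum_range (fun i => a.getD i 0 * b.getD (k - i) 0)]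
  have h1 : ∀ i ∈ Finset.Ico (k + 1 - b.length) (min (k + 1) a.length),
      a.getD i 0 * b.getD (k - i) 0
        = if i ≤ k ∧ k - i < b.length then a.getD i 0 * b.getD (k - i) 0 else 0 := by
    intro i hi
    rw [Finset.mem_Ico] at hi
    rw [if_pos (by omega)]
  rw [Finset.sum_congr rfl h1]
  apply Finset.sum_subset
  · intro i hi
    rw [Finset.mem_Ico] at hi
    rw [Finset.mem_range]
    omega
  · intro i hi hni
    rw [Finset.mem_range] at hi
    rw [Finset.mem_Ico] at hni
    rw [if_neg (by omega)]

theorem pvConv_high (a b : List Int) (h : Pre_mul_poly_mod_py_py a b)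
    (k : Nat) (hk : 3999 ≤ k) : pvConv a b k = 0 := by
  unfold pvConv
  apply Finset.sum_eq_zero
  intro i hi
  rw [Finset.mem_range] at hi
  by_cases hc : i ≤ k ∧ k - i < b.length
  · rw [if_pos hc]
    by_cases ha : a.getD i 0 = 0
    · rw [ha, zero_mul]
    · by_cases hb : b.getD (k - i) 0 = 0
      · rw [hb, mul_zero]
      · exact absurd (h i hi (k - i) hc.2 ha hb) (by omega)
  · rw [if_neg hc]

theorem pvC1_getD (a b : List Int) (j : Nat) (hj : j < 3999) :
    (pvOuterA a 0 b (List.replicate 3999 0)).getD j 0 = pvConv a b j := by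
  rw [pvOuterA_getD, List.getD_replicate 0 (by omega), List.length_replicate,
    if_pos hj, zero_add]
  unfold pvConv
  apply Finset.sum_congr rfl
  intro t _
  rw [Nat.zero_add]

theorem pv_main_eq (a b : List Int) (hpre : Pre_mul_poly_mod_py_py a b) :
    mul_poly_mod_py_py a b = mul_poly_mod_py_py_alt a b := by
  unfold mul_poly_mod_py_py mul_poly_mod_py_py_alt
  rw [PySem.List.foldl_append_singleton_eq_map, List.nil_append]
  have hclen : (pvOuterA a 0 b (List.replicate 3999 0)).length = 3999 := by
    rw [pvOuterA_length, List.length_replicate]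
  have hlen : (pvFoldA 1999 (pvOuterA a 0 b (List.replicate 3999 0))).length = 3999 := by
    rw [pvFoldA_length, hclen]
  apply List.ext_getElem
  · rw [List.length_map, List.length_take, hlen, List.length_map, List.length_range]
    omega
  · intro k hk1 hk2
    rw [List.length_map, List.length_take, hlen] at hk1
    have hk : k < 2000 := by omega
    rw [List.getElem_map, List.getElem_take, List.getElem_map, List.getElem_range,
      ← List.getD_eq_getElem _ 0 (by omega)]
    simp only [pvmod, pvConvB_eq_pvConv]
    rw [pvFoldA_getD_low 1999 (by omega) _ hclen k (by omega), pvC1_getD a b k (by omega)]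
    by_cases hk18 : k ≤ 1998
    · rw [if_pos (by omega : k + 2000 ≤ 1999 + 1999),
        pvC1_getD a b (k + 2000) (by omega)]
      by_cases hk1' : 1 ≤ k
      · rw [if_pos ⟨hk1', by omega⟩, if_pos hk1', pvC1_getD a b (k + 1999) (by omega)]
      · rw [if_neg (by omega), if_neg hk1']
        omega
    · rw [if_neg (by omega), if_pos ⟨by omega, by omega⟩,
        pvC1_getD a b (k + 1999) (by omega),
        pvConv_high a b hpre (k + 2000) (by omega), if_pos (by omega : 1 ≤ k)]
      omega

-- ===== VERDICT (by name: the statement is the Claim_ definition above) =====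
theorem mul_poly_mod_py_py_spec : Claim_equal_mul_poly_mod_py_py := by
  intro a b _ hpre
  unfold Spec_mul_poly_mod_py_py
  exact pv_main_eq a b hpre
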